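-- pv_equiv track=rewrite | github.com/vmware-labs/hci-benchmark-appliance | HCIBench/rvc_rvc/lib/rvc/modules/vsantest/automation/lib/parse-support-bundle/pyVpx/pyVim/vimApiTypeMatrix.py | BuildClasses
-- ===== SOURCE A (Python) =====
-- def AddClassIfNew(classes, cls):
--     if cls not in classes:
--         classes[cls] = len(classes)
--
-- def BuildClasses(references, classHierarchy):
--     classes = {}
--
--     for cls in list(references.keys()):
--         AddClassIfNew(classes, cls)
--
--         clsRefs = references[cls]
--         for propPath in list(clsRefs.keys()):
--             clsReferee = clsRefs[propPath]
--             AddClassIfNew(classes, clsReferee)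
--
--     for cls in classHierarchy:
--         AddClassIfNew(classes, cls)
--
--         for derivedCls in classHierarchy[cls]:
--             AddClassIfNew(classes, derivedCls)
--
--     return classes
-- ===== SOURCE B (Python) =====
-- def BuildClasses(references, classHierarchy):
--     seq = [c for cls, clsRefs in references.items() for c in (cls, *clsRefs.values())]
--     seq += [c for cls, derived in classHierarchy.items() for c in (cls, *derived)]
--     first = {c: p for p, c in reversed(list(enumerate(seq)))}
--     order = sorted(first, key=first.get)
--     return {c: i for i, c in enumerate(order)}
-- ===== Notes on version B (the rewrite author's own statement) =====
-- stated objective: alternative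
-- what changed: B flattens both inputs into one class sequence, builds a first-occurrence-position map with a single reversed-enumerate comprehension, and sorts the distinct classes by that position before enumerating, replacing A's incremental insert-if-new dict whose index is the running dict length.
import Mathlib
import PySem

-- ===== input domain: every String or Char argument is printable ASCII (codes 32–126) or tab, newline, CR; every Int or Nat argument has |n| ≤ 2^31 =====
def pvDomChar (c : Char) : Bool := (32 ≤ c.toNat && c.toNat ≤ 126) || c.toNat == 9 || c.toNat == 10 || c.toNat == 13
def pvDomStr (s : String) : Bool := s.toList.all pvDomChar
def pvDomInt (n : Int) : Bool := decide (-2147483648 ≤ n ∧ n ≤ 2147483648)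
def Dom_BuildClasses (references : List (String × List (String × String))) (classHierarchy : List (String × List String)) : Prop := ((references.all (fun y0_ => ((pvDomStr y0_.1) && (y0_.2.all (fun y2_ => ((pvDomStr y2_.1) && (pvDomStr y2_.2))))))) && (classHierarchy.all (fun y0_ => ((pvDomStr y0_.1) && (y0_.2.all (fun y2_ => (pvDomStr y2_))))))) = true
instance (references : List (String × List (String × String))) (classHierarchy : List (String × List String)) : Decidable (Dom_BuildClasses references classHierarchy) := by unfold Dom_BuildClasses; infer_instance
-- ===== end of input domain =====

-- B flattens both inputs into one class sequence and then SORTS the distinct classes by their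
-- first-occurrence position (sorted(set(seq), key=seq.index)) instead of A's incremental
-- insert-if-new-with-running-length dict accumulation (alternative algorithm, not faster).

-- ===== PORT A =====
def AddClassIfNew (classes : PySem.Dict String Int) (cls : String) : PySem.Dict String Int :=
  if classes.contains cls then classes else classes.insert cls (classes.size : Int)

def BuildClasses (references : List (String × List (String × String))) (classHierarchy : List (String × List String)) : List (String × Int) :=
  -- the Python parameters are dicts: model them exactly as PySem.Dict (duplicate keys merged, last value wins)
  let refs : PySem.Dict String (PySem.Dict String String) :=
    PySem.Dict.ofList (references.map (fun p => (p.1, PySem.Dict.ofList p.2)))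
  let ch : PySem.Dict String (List String) := PySem.Dict.ofList classHierarchy
  let classes : PySem.Dict String Int := PySem.Dict.empty
  let classes := refs.keys.foldl (fun classes cls =>
    let classes := AddClassIfNew classes cls
    let clsRefs := refs.getD cls PySem.Dict.empty   -- lookup of a key of refs; the default is never used
    clsRefs.keys.foldl (fun classes propPath =>
      AddClassIfNew classes (clsRefs.getD propPath "")) classes) classes
  let classes := ch.keys.foldl (fun classes cls =>
    let classes := AddClassIfNew classes cls
    (ch.getD cls []).foldl (fun classes derivedCls => AddClassIfNew classes derivedCls) classes) classes
  classes.items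

-- ===== PORT B =====
def BuildClasses_alt (references : List (String × List (String × String))) (classHierarchy : List (String × List String)) : List (String × Int) :=
  let refs : PySem.Dict String (PySem.Dict String String) :=
    PySem.Dict.ofList (references.map (fun p => (p.1, PySem.Dict.ofList p.2)))
  let ch : PySem.Dict String (List String) := PySem.Dict.ofList classHierarchy
  let seq := refs.items.flatMap (fun p => p.1 :: p.2.values)
  let seq := seq ++ ch.items.flatMap (fun p => p.1 :: p.2)
  -- {c: p for p, c in reversed(list(enumerate(seq)))}
  let first : PySem.Dict String Int :=
    PySem.Dict.ofList (((PySem.List.enumerate seq 0).map (fun p => (p.2, p.1))).reverse)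
  -- sorted(first, key=first.get); every key of first is in first, so first.get never returns None
  let order := PySem.List.sorted first.keys (fun c => first.getD c 0) false
  (PySem.List.enumerate order 0).map (fun p => (p.2, p.1))

-- ===== PRECONDITION & SPEC =====
def Spec_BuildClasses (references : List (String × List (String × String))) (classHierarchy : List (String × List String)) (out : List (String × Int)) : Prop := out = BuildClasses_alt references classHierarchy
instance (references : List (String × List (String × String))) (classHierarchy : List (String × List String)) (out : List (String × Int)) : Decidable (Spec_BuildClasses references classHierarchy out) := by unfold Spec_BuildClasses; infer_instance

-- ===== CLAIM (what is proved, stated in full; the proofs are below) =====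
def Claim_equal_BuildClasses : Prop := ∀ (references : List (String × List (String × String))) (classHierarchy : List (String × List String)), Dom_BuildClasses references classHierarchy → Spec_BuildClasses references classHierarchy (BuildClasses references classHierarchy)

-- ===== LEMMAS AND PROOFS =====

-- the dict A accumulates, as a function of the ordered list of distinct classes seen so far
def idxDict (ks : List String) : PySem.Dict String Int :=
  PySem.Dict.mk ((PySem.List.enumerate ks 0).map (fun p => (p.2, p.1)))

theorem contains_idxDict (ks : List String) (x : String) :
    (idxDict ks).contains x = ks.contains x := by
  have h := congrArg (fun l => List.any l (fun y => y == x)) (PySem.List.map_snd_enumerate ks 0)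
  simp only [List.any_map, Function.comp_def] at h
  simp only [PySem.Dict.contains, idxDict, List.any_map, Function.comp_def]
  rw [h, List.any_beq']

theorem addClassIfNew_idxDict (ks : List String) (x : String) :
    AddClassIfNew (idxDict ks) x = idxDict (PySem.Set.add ks x) := by
  unfold AddClassIfNew PySem.Set.add
  rw [contains_idxDict]
  have hsc : PySem.Set.contains ks x = ks.contains x := by simp [PySem.Set.contains]
  rw [hsc]
  by_cases h : ks.contains x = true
  · rw [if_pos h, if_pos h]
  · rw [if_neg h, if_neg h]
    apply PySem.Dict.ext
    rw [PySem.Dict.items_insert_of_not_contains (h := by rw [contains_idxDict]; exact Bool.not_eq_true _ ▸ h)]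
    simp [idxDict, PySem.Dict.size, PySem.List.enumerate_append, PySem.List.length_enumerate]

theorem foldl_addClassIfNew (xs : List String) (ks : List String) :
    xs.foldl AddClassIfNew (idxDict ks) = idxDict (PySem.Set.update ks xs) := by
  induction xs generalizing ks with
  | nil => rfl
  | cons x xs ih =>
      simp only [List.foldl_cons, addClassIfNew_idxDict]
      exact ih _

-- every value of a dict built from a pair list comes from the start dict or from the list
theorem mem_values_update {kappa nu : Type} [BEq kappa] [LawfulBEq kappa]
    (ps : List (kappa × nu)) (d : PySem.Dict kappa nu) (w : nu)
    (h : w ∈ (d.update ps).values) : w ∈ d.values ∨ w ∈ ps.map (·.2) := by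
  induction ps generalizing d with
  | nil => exact Or.inl h
  | cons p ps ih =>
      rcases ih _ h with h' | h'
      · rcases PySem.Dict.mem_values_insert _ _ _ _ h' with h'' | h''
        · exact Or.inr (by simp [h''])
        · exact Or.inl h''
      · exact Or.inr (by simpa using Or.inr (by simpa using h'))

-- A's first loop is the fold of AddClassIfNew over the flattened key/referee sequence
theorem flattenRefs (refs : PySem.Dict String (PySem.Dict String String))
    (hk : refs.keys.Nodup) (hv : ∀ v ∈ refs.values, v.keys.Nodup) (d : PySem.Dict String Int) :
    refs.keys.foldl (fun classes cls =>
      (refs.getD cls PySem.Dict.empty).keys.foldl (fun classes propPath =>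
        AddClassIfNew classes ((refs.getD cls PySem.Dict.empty).getD propPath ""))
        (AddClassIfNew classes cls)) d
    = (refs.items.flatMap (fun p => p.1 :: p.2.values)).foldl AddClassIfNew d := by
  rw [List.foldl_flatMap]
  conv_lhs => rw [show refs.keys = refs.items.map (·.1) from rfl, List.foldl_map]
  apply PySem.List.foldl_congr_mem
  intro acc p hp
  have hget : refs.getD p.1 PySem.Dict.empty = p.2 := PySem.Dict.getD_of_mem_items _ hp hk _
  have hnd : p.2.keys.Nodup := hv _ (List.mem_map_of_mem hp)
  rw [List.foldl_cons, hget, PySem.Dict.values_eq_map_keys p.2 hnd "", List.foldl_map]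

-- A's second loop likewise
theorem flattenCh (ch : PySem.Dict String (List String))
    (hk : ch.keys.Nodup) (d : PySem.Dict String Int) :
    ch.keys.foldl (fun classes cls =>
      (ch.getD cls []).foldl (fun classes derivedCls => AddClassIfNew classes derivedCls)
        (AddClassIfNew classes cls)) d
    = (ch.items.flatMap (fun p => p.1 :: p.2)).foldl AddClassIfNew d := by
  rw [List.foldl_flatMap]
  conv_lhs => rw [show ch.keys = ch.items.map (·.1) from rfl, List.foldl_map]
  apply PySem.List.foldl_congr_mem
  intro acc p hp
  have hget : ch.getD p.1 [] = p.2 := PySem.Dict.getD_of_mem_items _ hp hk _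
  rw [List.foldl_cons, hget]

-- first-occurrence positions strictly increase along set(seq) (first-insertion order),
-- so B's sort by seq.index is the identity on it
theorem pairwise_idx_ofList (seq : List String) :
    (PySem.Set.ofList seq).Pairwise
      (fun a b => ((PySem.List.index? seq a).getD 0) < ((PySem.List.index? seq b).getD 0)) := by
  induction seq using List.reverseRecOn with
  | nil => simp [PySem.Set.ofList]
  | append_singleton xs x ih =>
      have hof : PySem.Set.ofList (xs ++ [x]) = PySem.Set.add (PySem.Set.ofList xs) x := by
        rw [PySem.Set.ofList_eq_foldl, PySem.Set.ofList_eq_foldl, List.foldl_append]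
        rfl
      have hmem : ∀ a, a ∈ PySem.Set.ofList xs → a ∈ xs := by
        intro a ha; exact (PySem.Set.mem_ofList _ _).mp ha
      have hstable : ∀ a ∈ PySem.Set.ofList xs,
          PySem.List.index? (xs ++ [x]) a = PySem.List.index? xs a := by
        intro a ha; exact PySem.List.index?_append_of_mem _ (hmem a ha)
      have ih' : (PySem.Set.ofList xs).Pairwise
          (fun a b => ((PySem.List.index? (xs ++ [x]) a).getD 0)
            < ((PySem.List.index? (xs ++ [x]) b).getD 0)) := by
        refine List.Pairwise.imp_of_mem ?_ ih
        intro a b ha hb h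
        rw [hstable a ha, hstable b hb]; exact h
      rw [hof]
      unfold PySem.Set.add
      by_cases hx : PySem.Set.contains (PySem.Set.ofList xs) x = true
      · rw [if_pos hx]; exact ih'
      · rw [if_neg hx]
        have hxnot : x ∉ xs := by
          intro hmem'
          exact hx (by simpa [PySem.Set.contains] using (PySem.Set.mem_ofList xs x).mpr hmem')
        rw [List.pairwise_append]
        refine ⟨ih', List.pairwise_singleton _ _, ?_⟩
        intro a ha b hb
        have hb' : b = x := List.mem_singleton.mp hb
        subst hb'
        rw [hstable a ha, PySem.List.index?_append_singleton_self xs b hxnot]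
        have hmema : a ∈ xs := hmem a ha
        obtain ⟨k, hk⟩ := Option.isSome_iff_exists.mp ((PySem.List.index?_isSome_iff xs a).mpr hmema)
        obtain ⟨hklt, -, -⟩ := PySem.List.getElem_of_index?_eq_some hk
        simp only [hk, Option.getD_some]
        exact hklt

-- appending one pair to a literal dict is one insert
theorem ofList_append_singleton {kappa nu : Type} [BEq kappa]
    (l : List (kappa × nu)) (k : kappa) (v : nu) :
    PySem.Dict.ofList (l ++ [(k, v)]) = (PySem.Dict.ofList l).insert k v := by
  simp [PySem.Dict.ofList, PySem.Dict.update, List.foldl_append]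

-- B's reversed-enumerate dict maps each class to its FIRST-occurrence position
theorem get?_firstDict (seq : List String) (s : Int) (c : String) :
    (PySem.Dict.ofList (((PySem.List.enumerate seq s).map (fun p => (p.2, p.1))).reverse)).get? c
      = (PySem.List.index? seq c).map (fun k => s + (k : Int)) := by
  induction seq generalizing s with
  | nil => simp [PySem.List.enumerate_nil, PySem.List.index?_eq_idxOf?, PySem.Dict.ofList,
      PySem.Dict.update, PySem.Dict.get?_empty]
  | cons x xs ih =>
      rw [PySem.List.enumerate_cons]
      simp only [List.map_cons, List.reverse_cons]
      rw [ofList_append_singleton]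
      by_cases hc : c = x
      · subst hc
        rw [PySem.Dict.get?_insert_self, PySem.List.index?_cons_self]
        simp
      · rw [PySem.Dict.get?_insert_of_ne _ _ hc, ih (s + 1),
          PySem.List.index?_cons_of_ne _ (fun h => hc h.symm)]
        cases h : List.idxOf? c xs with
        | none => simp [h]
        | some k => simp [h]; omega

-- and its keys are exactly the distinct classes of seq
theorem mem_keys_firstDict (seq : List String) (c : String) :
    c ∈ (PySem.Dict.ofList (((PySem.List.enumerate seq 0).map (fun p => (p.2, p.1))).reverse)
          : PySem.Dict String Int).keys ↔ c ∈ seq := by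
  rw [← PySem.Dict.contains_iff_mem_keys, PySem.Dict.contains_eq_isSome_get?, get?_firstDict]
  by_cases hc : c ∈ seq
  · obtain ⟨k, hk⟩ := Option.isSome_iff_exists.mp ((PySem.List.index?_isSome_iff seq c).mpr hc)
    have hk' : List.idxOf? c seq = some k := by rw [← PySem.List.index?_eq_idxOf?]; exact hk
    simp [hk', hc]
  · have hn' : List.idxOf? c seq = none := by
      rw [← PySem.List.index?_eq_idxOf?]; exact (PySem.List.index?_eq_none_iff seq c).mpr hc
    simp [hn', hc]

-- B's sort of the first-occurrence dict by its values is the dedup of seq in order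
theorem sorted_firstDict_eq (seq : List String) :
    PySem.List.sorted
      (PySem.Dict.ofList (((PySem.List.enumerate seq 0).map (fun p => (p.2, p.1))).reverse)
        : PySem.Dict String Int).keys
      (fun c => (PySem.Dict.ofList (((PySem.List.enumerate seq 0).map (fun p => (p.2, p.1))).reverse)
        : PySem.Dict String Int).getD c 0) false
    = PySem.Set.ofList seq := by
  set first : PySem.Dict String Int :=
    PySem.Dict.ofList (((PySem.List.enumerate seq 0).map (fun p => (p.2, p.1))).reverse) with hfirst
  have hgetD : ∀ c ∈ seq, ∃ k : Nat, PySem.List.index? seq c = some k ∧ first.getD c 0 = (k : Int) := by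
    intro c hc
    obtain ⟨k, hk⟩ := Option.isSome_iff_exists.mp ((PySem.List.index?_isSome_iff seq c).mpr hc)
    refine ⟨k, hk, ?_⟩
    rw [PySem.Dict.getD_eq_get?_getD, hfirst, get?_firstDict, hk]
    simp
  apply PySem.List.sorted_eq_of_perm_of_pairwise_lt
  · refine (List.perm_ext_iff_of_nodup (PySem.Set.nodup_ofList seq) (PySem.Dict.nodup_keys_ofList _)).mpr ?_
    intro a
    rw [PySem.Set.mem_ofList, mem_keys_firstDict]
  · refine List.Pairwise.imp_of_mem ?_ (pairwise_idx_ofList seq)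
    intro a b ha hb h
    obtain ⟨ka, hka, hda⟩ := hgetD a ((PySem.Set.mem_ofList seq a).mp ha)
    obtain ⟨kb, hkb, hdb⟩ := hgetD b ((PySem.Set.mem_ofList seq b).mp hb)
    rw [hda, hdb]
    rw [hka, hkb] at h
    simp only [Option.getD_some] at h
    exact_mod_cast h

theorem BuildClasses_spec : Claim_equal_BuildClasses := by
  intro references classHierarchy _
  simp only [Spec_BuildClasses, BuildClasses, BuildClasses_alt]
  set refs : PySem.Dict String (PySem.Dict String String) :=
    PySem.Dict.ofList (references.map (fun p => (p.1, PySem.Dict.ofList p.2))) with hrefs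
  set ch : PySem.Dict String (List String) := PySem.Dict.ofList classHierarchy with hch
  have hv : ∀ v ∈ refs.values, v.keys.Nodup := by
    intro v hvmem
    rcases mem_values_update _ _ _ hvmem with h | h
    · simp [PySem.Dict.values, PySem.Dict.empty] at h
    · simp only [List.map_map, Function.comp_def, List.mem_map] at h
      obtain ⟨q, _, rfl⟩ := h
      exact PySem.Dict.nodup_keys_ofList _
  rw [flattenRefs refs (PySem.Dict.nodup_keys_ofList _) hv,
      flattenCh ch (PySem.Dict.nodup_keys_ofList _), ← List.foldl_append]
  set seq := refs.items.flatMap (fun p => p.1 :: p.2.values)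
    ++ ch.items.flatMap (fun p => p.1 :: p.2) with hseq
  rw [sorted_firstDict_eq seq]
  have hempty : (PySem.Dict.empty : PySem.Dict String Int) = idxDict [] := rfl
  rw [hempty, foldl_addClassIfNew]
  rfl

-- ===== VERDICT =====
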